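-- pv_equiv track=rewrite | github.com/ImmanuelHaffner/JACCo-old | test/first.py | firstk
-- ===== SOURCE A (Python) =====
-- def isTerminal(x):
--     return not x.islower()
--
-- def firstk(G, k = 1):
--     F = {}
--
--     def concat(A, B):
--         X = set()
--         for a in A:
--             if (len(a) < k):
--                 for b in B:
--                     X.add((a + b)[:k])
--             else:
--                 X.add(a[:k])
--         return X
--
--     def first(x):
--         M = set()
--         for rhs in G[x]:
--             S = set([tuple()])
--             for y in rhs:
--                 if (isTerminal(y)):
--                     S = concat(S, set(((y,),)))
--                 else:
--                     S = concat(S, F[y])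
--             M.update(S)
--         return M
--
--     for nt in G.keys():
--         F[nt] = set()
--
--     while (True):
--         F_ = F.copy()
--         for nt in F_:
--             F_[nt] = first(nt)
--         if (F == F_):
--             break
--         F = F_
--
--     return F
-- ===== SOURCE B (Python) =====
-- def isTerminal(x):
--     return not x.islower()
--
-- def firstk(G, k = 1):
--     names = list(G)
--
--     def prefixes(F, syms, pre):
--         # DFS: yield the k-truncated terminal prefixes derivable from pre + syms
--         if len(pre) >= k or not syms:
--             yield pre[:k]
--         else:
--             y = syms[0]
--             for b in ([(y,)] if isTerminal(y) else F[y]):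
--                 yield from prefixes(F, syms[1:], (pre + b)[:k])
--
--     table = [set() for _ in names]
--     while True:
--         F = dict(zip(names, table))
--         new = [{t for rhs in G[x] for t in prefixes(F, rhs, ())} for x in names]
--         if table == new:
--             return dict(zip(names, table))
--         table = new
-- ===== Notes on version B (the rewrite author's own statement) =====
-- stated objective: alternative
-- what changed: B keeps the fixpoint state as a plain list of FIRST-sets parallel to the key list instead of A's dict that is copied and mutated in place: each round is a list comprehension recomputing every entry by a recursive DFS enumeration of k-truncated prefixes (replacing A's set-to-set 'concat' product fold per symbol), and convergence is tested by pairwise list comparison instead of dict equality.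
import Mathlib
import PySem

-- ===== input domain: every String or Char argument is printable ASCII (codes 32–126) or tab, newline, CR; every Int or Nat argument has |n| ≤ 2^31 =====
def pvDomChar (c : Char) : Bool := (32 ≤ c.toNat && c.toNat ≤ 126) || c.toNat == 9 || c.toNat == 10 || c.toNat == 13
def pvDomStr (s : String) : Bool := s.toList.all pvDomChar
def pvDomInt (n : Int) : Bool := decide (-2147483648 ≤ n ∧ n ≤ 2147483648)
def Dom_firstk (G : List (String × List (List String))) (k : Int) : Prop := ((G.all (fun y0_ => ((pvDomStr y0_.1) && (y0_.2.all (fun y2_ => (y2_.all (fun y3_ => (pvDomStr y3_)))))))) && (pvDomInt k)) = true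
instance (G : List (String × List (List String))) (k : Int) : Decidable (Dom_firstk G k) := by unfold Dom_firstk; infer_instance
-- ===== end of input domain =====

-- B replaces A's dict-of-sets Jacobi iteration with a parallel-table recursion: per
-- production the set-to-set 'concat' fold becomes a DFS prefix enumeration, and the
-- fixpoint state is a plain list of sets compared pairwise (objective: alternative).
-- Neither program mutates its argument.

-- ===== PORT A =====
-- hand port of Python str.islower() (no PySem primitive): at least one cased character
-- and no uppercase one — exact on the printable-ASCII domain, where cased = letters.
def pyIslower (s : String) : Bool :=
  s.toList.any PySem.Chars.islower && !(s.toList.any PySem.Chars.isupper)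

def isTerminal (x : String) : Bool := !(pyIslower x)

-- Python's `==` on the dicts F, F_ (values are sets): equal key sets, set-equal values.
def pyFEq (d e : PySem.Dict String (PySem.Set (List String))) : Bool :=
  PySem.Set.equal (PySem.Set.ofList d.keys) (PySem.Set.ofList e.keys) &&
  d.keys.all (fun nt => PySem.Set.equal (d.getD nt []) (e.getD nt []))

def concatA (k : Int) (A B : PySem.Set (List String)) : PySem.Set (List String) :=
  A.foldl (fun X a =>
    if (a.length : Int) < k then
      B.foldl (fun X b => PySem.Set.add X (PySem.List.slice (a ++ b) none (some k))) X
    else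
      PySem.Set.add X (PySem.List.slice a none (some k))) []

-- F[y] raises KeyError where y is a missing non-terminal: Pre_firstk excludes that,
-- the port reads an empty set there (getD).
def firstA (G : PySem.Dict String (List (List String))) (k : Int)
    (F : PySem.Dict String (PySem.Set (List String))) (x : String) :
    PySem.Set (List String) :=
  (G.getD x []).foldl (fun M rhs =>
    PySem.Set.update M
      (rhs.foldl (fun S y => concatA k S (if isTerminal y then [[y]] else F.getD y []))
        ([[]] : PySem.Set (List String)))) []

-- F_ = F.copy(); for nt in F_: F_[nt] = first(nt)   (first reads the old F)
def stepA (G : PySem.Dict String (List (List String))) (k : Int)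
    (F : PySem.Dict String (PySem.Set (List String))) :
    PySem.Dict String (PySem.Set (List String)) :=
  F.keys.foldl (fun d nt => d.insert nt (firstA G k F nt)) F

-- the `while True` loop; the Nat fuel is only a totality guard, the loop exits on the
-- fixpoint test exactly as the Python does
def loopA (G : PySem.Dict String (List (List String))) (k : Int) :
    Nat → PySem.Dict String (PySem.Set (List String)) →
    PySem.Dict String (PySem.Set (List String))
  | 0, F => F
  | fuel + 1, F =>
    let F' := stepA G k F
    if pyFEq F F' then F else loopA G k fuel F'

def firstk (G : List (String × List (List String))) (k : Int) :
    List (String × List (List String)) :=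
  (loopA (PySem.Dict.ofList G) k 1000000
    ((PySem.Dict.ofList G).keys.foldl
      (fun d nt => d.insert nt ([] : PySem.Set (List String))) PySem.Dict.empty)).items

-- ===== PORT B =====
-- prefixes(F, syms, pre): DFS over the symbols, truncation-based pruning; the
-- generator's yields, in order, as a list
def walkB (k : Int) (F : PySem.Dict String (PySem.Set (List String))) :
    List String → List String → List (List String)
  | [], pre => [PySem.List.slice pre none (some k)]
  | y :: rest, pre =>
    if k ≤ (pre.length : Int) then [PySem.List.slice pre none (some k)]
    else
      (if isTerminal y then [[y]] else F.getD y []).flatMap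
        (fun b => walkB k F rest (PySem.List.slice (pre ++ b) none (some k)))

-- {t for rhs in G[x] for t in prefixes(F, rhs, ())}
def firstB (G : PySem.Dict String (List (List String))) (k : Int)
    (F : PySem.Dict String (PySem.Set (List String))) (x : String) :
    PySem.Set (List String) :=
  PySem.Set.ofList ((G.getD x []).flatMap (fun rhs => walkB k F rhs []))

-- Python's `==` on two lists of sets (pairwise set equality)
def setListEq : List (PySem.Set (List String)) → List (PySem.Set (List String)) → Bool
  | [], [] => true
  | a :: as, b :: bs => PySem.Set.equal a b && setListEq as bs
  | _, _ => false

-- the `while True` loop over the parallel table of sets; fuel is only a totality guard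
def refineB (G : PySem.Dict String (List (List String))) (k : Int) (names : List String) :
    Nat → List (PySem.Set (List String)) → List (PySem.Set (List String))
  | 0, table => table
  | fuel + 1, table =>
    let F := PySem.Dict.ofList (names.zip table)
    let new := names.map (fun x => firstB G k F x)
    if setListEq table new then table else refineB G k names fuel new

def firstk_alt (G : List (String × List (List String))) (k : Int) :
    List (String × List (List String)) :=
  let Gd := PySem.Dict.ofList G
  let names := Gd.keys
  (PySem.Dict.ofList
    (names.zip (refineB Gd k names 1000000 (names.map (fun _ => []))))).items

-- ===== PRECONDITION & SPEC =====
-- Pre_ excludes exactly the inputs on which Python A raises KeyError: a lowercase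
-- (non-terminal) symbol occurring on some right-hand side that is not a key of G.
def Pre_firstk (G : List (String × List (List String))) (k : Int) : Prop :=
  ∀ p ∈ G, ∀ rhs ∈ p.2, ∀ y ∈ rhs, pyIslower y = true → y ∈ G.map Prod.fst

instance (G : List (String × List (List String))) (k : Int) : Decidable (Pre_firstk G k) := by
  unfold Pre_firstk; infer_instance

def pvWitness_firstk : (List (String × List (List String))) × Int :=
  ([("s", [["A"], ["s", "B"]]), ("t", [["s"], []])], 2)

def Spec_firstk (G : List (String × List (List String))) (k : Int) (out : List (String × List (List String))) : Prop := out = firstk_alt G k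
instance (G : List (String × List (List String))) (k : Int) (out : List (String × List (List String))) : Decidable (Spec_firstk G k out) := by unfold Spec_firstk; infer_instance

-- ===== CLAIM (what is proved, stated in full; the proofs are below) =====
def Claim_equal_firstk : Prop := ∀ (G : List (String × List (List String))) (k : Int), Dom_firstk G k → Pre_firstk G k → Spec_firstk G k (firstk G k)

-- ===== LEMMAS AND PROOFS =====

-- the option list for one symbol, and A's per-symbol step on one prefix
def pvOpt (F : PySem.Dict String (PySem.Set (List String))) (y : String) :
    PySem.Set (List String) :=
  if isTerminal y then [[y]] else F.getD y []

def pvStep (k : Int) (F : PySem.Dict String (PySem.Set (List String))) (y : String)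
    (a : List String) : List (List String) :=
  if (a.length : Int) < k then
    (pvOpt F y).map (fun b => PySem.List.slice (a ++ b) none (some k))
  else [PySem.List.slice a none (some k)]

lemma pv_slice_nil (k : Int) : PySem.List.slice ([] : List String) none (some k) = [] := by
  simp [PySem.List.slice]

lemma pv_slice_idem (k : Int) (hk : 0 ≤ k) (x : List String) :
    PySem.List.slice (PySem.List.slice x none (some k)) none (some k) =
      PySem.List.slice x none (some k) := by
  rw [PySem.List.slice_to (xs := x) hk, PySem.List.slice_to (xs := List.take k.toNat x) hk,
    List.take_take, min_self]

lemma pv_walk_high (k : Int) (F : PySem.Dict String (PySem.Set (List String)))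
    (syms : List String) (a : List String) (h : ¬ (a.length : Int) < k) :
    walkB k F syms a = [PySem.List.slice a none (some k)] := by
  cases syms with
  | nil => rfl
  | cons y rest => simp [walkB, Int.not_lt.mp h]

lemma pv_foldl_add_flatMap (l : List (List String))
    (g : List String → List (List String)) (X : PySem.Set (List String)) :
    l.foldl (fun X a => (g a).foldl PySem.Set.add X) X =
      (l.flatMap g).foldl PySem.Set.add X := by
  induction l generalizing X with
  | nil => rfl
  | cons a t ih => simp only [List.foldl_cons, List.flatMap_cons, List.foldl_append, ih]

lemma pv_concatA_eq (k : Int) (F : PySem.Dict String (PySem.Set (List String)))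
    (y : String) (S : PySem.Set (List String)) :
    concatA k S (pvOpt F y) =
      ((S.flatMap (pvStep k F y)).foldl PySem.Set.add []) := by
  unfold concatA
  rw [← pv_foldl_add_flatMap]
  apply PySem.List.foldl_congr_mem
  intro X a _
  by_cases h : (a.length : Int) < k
  · simp only [pvStep, h, if_pos, List.foldl_map]
  · simp only [pvStep, h, if_false, List.foldl_cons, List.foldl_nil]

lemma pv_ofList_filter (g : List String → Bool) (w : List (List String)) :
    (PySem.Set.ofList w).filter g = PySem.Set.ofList (w.filter g) := by
  induction w using List.reverseRecOn with
  | nil => rfl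
  | append_singleton w x ih =>
    by_cases hg : g x = true
    · have hfx : List.filter g [x] = [x] := by simp [hg]
      by_cases hx : x ∈ PySem.Set.ofList w
      · have h2 : x ∈ PySem.Set.ofList (w.filter g) :=
          (PySem.Set.mem_ofList _ _).mpr
            (List.mem_filter.mpr ⟨(PySem.Set.mem_ofList _ _).mp hx, hg⟩)
        calc (PySem.Set.ofList (w ++ [x])).filter g
            = (PySem.Set.ofList w).filter g := by
              rw [PySem.Set.ofList_append_singleton, PySem.Set.add_of_mem hx]
          _ = PySem.Set.ofList (w.filter g) := ih
          _ = PySem.Set.ofList ((w ++ [x]).filter g) := by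
              rw [List.filter_append, hfx, PySem.Set.ofList_append_singleton,
                PySem.Set.add_of_mem h2]
      · have h2 : x ∉ PySem.Set.ofList (w.filter g) := fun h =>
          hx ((PySem.Set.mem_ofList _ _).mpr
            (List.mem_of_mem_filter ((PySem.Set.mem_ofList _ _).mp h)))
        calc (PySem.Set.ofList (w ++ [x])).filter g
            = ((PySem.Set.ofList w) ++ [x]).filter g := by
              rw [PySem.Set.ofList_append_singleton, PySem.Set.add_of_not_mem hx]
          _ = (PySem.Set.ofList w).filter g ++ [x] := by
              rw [List.filter_append, hfx]
          _ = PySem.Set.ofList (w.filter g) ++ [x] := by rw [ih]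
          _ = PySem.Set.ofList ((w ++ [x]).filter g) := by
              rw [List.filter_append, hfx, PySem.Set.ofList_append_singleton,
                PySem.Set.add_of_not_mem h2]
    · have hfx : List.filter g [x] = [] := by simp [hg]
      by_cases hx : x ∈ PySem.Set.ofList w
      · calc (PySem.Set.ofList (w ++ [x])).filter g
            = (PySem.Set.ofList w).filter g := by
              rw [PySem.Set.ofList_append_singleton, PySem.Set.add_of_mem hx]
          _ = PySem.Set.ofList (w.filter g) := ih
          _ = PySem.Set.ofList ((w ++ [x]).filter g) := by
              rw [List.filter_append, hfx, List.append_nil]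
      · calc (PySem.Set.ofList (w ++ [x])).filter g
            = ((PySem.Set.ofList w) ++ [x]).filter g := by
              rw [PySem.Set.ofList_append_singleton, PySem.Set.add_of_not_mem hx]
          _ = (PySem.Set.ofList w).filter g := by
              rw [List.filter_append, hfx, List.append_nil]
          _ = PySem.Set.ofList (w.filter g) := ih
          _ = PySem.Set.ofList ((w ++ [x]).filter g) := by
              rw [List.filter_append, hfx, List.append_nil]

lemma pv_ofList_cons_filter (a : List String) (t : List (List String)) :
    PySem.Set.ofList (a :: t) =
      a :: PySem.Set.ofList (t.filter (fun x => !(x == a))) := by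
  rw [PySem.Set.ofList_cons]
  show a :: (PySem.Set.ofList t).filter (fun x => !(x == a)) = _
  rw [pv_ofList_filter]

lemma pv_flatMap_filter_drop (f : List String → List (List String))
    (q : List String → Bool) (a : List String) (hq : ∀ x ∈ f a, q x = false)
    (t : List (List String)) :
    ((t.filter (fun x => !(x == a))).flatMap f).filter q =
      (t.flatMap f).filter q := by
  induction t with
  | nil => rfl
  | cons b t ih =>
    by_cases hb : b = a
    · subst hb
      have h0 : List.filter q (f b) = [] :=
        List.filter_eq_nil_iff.mpr (fun x hx hqx => by simp [hq x hx] at hqx)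
      rw [List.filter_cons_of_neg (by simp), List.flatMap_cons, List.filter_append, h0,
        List.nil_append]
      exact ih
    · rw [List.filter_cons_of_pos (by simp [hb]), List.flatMap_cons, List.flatMap_cons,
        List.filter_append, List.filter_append, ih]

lemma pv_key' : ∀ (n : Nat) (L : List (List String)), L.length ≤ n →
    ∀ (f : List String → List (List String)) (p : List String → Bool),
      PySem.Set.ofList (((PySem.Set.ofList L).flatMap f).filter p) =
        PySem.Set.ofList ((L.flatMap f).filter p) := by
  intro n
  induction n with
  | zero =>
    intro L hL f p
    have : L = [] := List.eq_nil_of_length_eq_zero (Nat.le_zero.mp hL)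
    subst this; rfl
  | succ n ih =>
    intro L hL f p
    cases L with
    | nil => rfl
    | cons a t =>
      have split : ∀ (u w : List (List String)),
          PySem.Set.ofList (u ++ w) =
            PySem.Set.ofList u ++
              (PySem.Set.ofList w).filter
                (fun y => !((PySem.Set.ofList u).contains y)) := by
        intro u w
        rw [PySem.Set.ofList_append, PySem.Set.update_eq_append_filter]
      set t' := t.filter (fun x => !(x == a)) with ht'
      have hlt : t'.length ≤ n := by
        have h1 : t'.length ≤ t.length := List.length_filter_le _ _
        have h2 : t.length ≤ n := by simpa using Nat.succ_le_succ_iff.mp hL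
        omega
      set u := (f a).filter p with hu
      set nu : List String → Bool :=
        fun y => !((PySem.Set.ofList u).contains y) with hnu
      set q : List String → Bool := fun y => nu y && p y with hq
      have hqa : ∀ x ∈ f a, q x = false := by
        intro x hx
        by_cases hp : p x = true
        · have hxu : x ∈ u := by rw [hu]; exact List.mem_filter.mpr ⟨hx, hp⟩
          simp [hq, hnu]
          intro hn
          exact absurd hxu hn
        · have hp' : p x = false := eq_false_of_ne_true hp
          simp [hq, hp']
      calc PySem.Set.ofList (((PySem.Set.ofList (a :: t)).flatMap f).filter p)
          = PySem.Set.ofList ((f a ++ (PySem.Set.ofList t').flatMap f).filter p) := by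
            rw [pv_ofList_cons_filter, List.flatMap_cons]
        _ = PySem.Set.ofList (u ++ ((PySem.Set.ofList t').flatMap f).filter p) := by
            rw [List.filter_append]
        _ = PySem.Set.ofList u ++
              (PySem.Set.ofList (((PySem.Set.ofList t').flatMap f).filter p)).filter nu := by
            rw [split]
        _ = PySem.Set.ofList u ++
              (PySem.Set.ofList ((t'.flatMap f).filter p)).filter nu := by
            rw [ih t' hlt f p]
        _ = PySem.Set.ofList u ++
              PySem.Set.ofList ((t'.flatMap f).filter q) := by
            rw [pv_ofList_filter, List.filter_filter]
        _ = PySem.Set.ofList u ++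
              PySem.Set.ofList ((t.flatMap f).filter q) := by
            rw [ht', pv_flatMap_filter_drop f q a hqa t]
        _ = PySem.Set.ofList u ++
              (PySem.Set.ofList ((t.flatMap f).filter p)).filter nu := by
            rw [pv_ofList_filter, List.filter_filter]
        _ = PySem.Set.ofList (u ++ ((t.flatMap f).filter p)) := by rw [split]
        _ = PySem.Set.ofList (((a :: t).flatMap f).filter p) := by
            rw [List.flatMap_cons, List.filter_append]

lemma pv_key (L : List (List String)) (f : List String → List (List String)) :
    PySem.Set.ofList ((PySem.Set.ofList L).flatMap f) =
      PySem.Set.ofList (L.flatMap f) := by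
  have := pv_key' L.length L le_rfl f (fun _ => true)
  simpa [List.filter_true] using this

lemma pv_step_stable (k : Int) (F : PySem.Dict String (PySem.Set (List String)))
    (y : String) (a : List String)
    (ha : PySem.List.slice a none (some k) = a) :
    ∀ e ∈ pvStep k F y a, PySem.List.slice e none (some k) = e := by
  intro e he
  by_cases h : (a.length : Int) < k
  · simp only [pvStep, h, if_pos, List.mem_map] at he
    obtain ⟨b, _, rfl⟩ := he
    have hk : 0 ≤ k := by
      have : (0 : Int) ≤ a.length := Int.natCast_nonneg _
      omega
    exact pv_slice_idem k hk _
  · simp only [pvStep, h, if_false, List.mem_singleton] at he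
    subst he; rw [ha, ha]

lemma pv_walk_cons (k : Int) (F : PySem.Dict String (PySem.Set (List String)))
    (y : String) (rest : List String) (a : List String)
    (ha : PySem.List.slice a none (some k) = a) :
    (pvStep k F y a).flatMap (walkB k F rest) = walkB k F (y :: rest) a := by
  by_cases h : (a.length : Int) < k
  · have hg : ¬ k ≤ (a.length : Int) := Int.not_le.mpr h
    simp only [pvStep, h, if_pos, walkB, hg, if_false]
    rw [List.flatMap_map]
    rfl
  · have hg : k ≤ (a.length : Int) := Int.not_lt.mp h
    simp only [pvStep, h, if_false, walkB, hg, if_pos, List.flatMap_cons,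
      List.flatMap_nil, List.append_nil]
    rw [ha, pv_walk_high k F rest a h, ha]

lemma pv_L2 (k : Int) (F : PySem.Dict String (PySem.Set (List String))) :
    ∀ (syms : List String) (L : List (List String)),
      (∀ a ∈ L, PySem.List.slice a none (some k) = a) →
      syms.foldl (fun S y => concatA k S (pvOpt F y)) (PySem.Set.ofList L) =
        PySem.Set.ofList (L.flatMap (fun a => walkB k F syms a)) := by
  intro syms
  induction syms with
  | nil =>
    intro L h
    simp only [List.foldl_nil]
    have h1 : L.flatMap (fun a => walkB k F [] a) = L.flatMap (fun a => [a]) := by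
      apply List.flatMap_congr
      intro a haL
      show [PySem.List.slice a none (some k)] = [a]
      rw [h a haL]
    rw [h1, List.flatMap_singleton']
  | cons y rest ih =>
    intro L h
    rw [List.foldl_cons]
    have hC : concatA k (PySem.Set.ofList L) (pvOpt F y) =
        PySem.Set.ofList (L.flatMap (pvStep k F y)) := by
      rw [pv_concatA_eq]
      have h2 : ((PySem.Set.ofList L).flatMap (pvStep k F y)).foldl PySem.Set.add [] =
          PySem.Set.ofList ((PySem.Set.ofList L).flatMap (pvStep k F y)) := rfl
      rw [h2, pv_key]
    rw [hC]
    have hInv' : ∀ e ∈ L.flatMap (pvStep k F y),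
        PySem.List.slice e none (some k) = e := by
      intro e he
      obtain ⟨a, haL, hea⟩ := List.mem_flatMap.mp he
      exact pv_step_stable k F y a (h a haL) e hea
    rw [ih (L.flatMap (pvStep k F y)) hInv']
    congr 1
    rw [List.flatMap_assoc]
    apply List.flatMap_congr
    intro a haL
    exact pv_walk_cons k F y rest a (h a haL)

lemma pv_update_ofList (M : PySem.Set (List String)) (l : List (List String)) :
    PySem.Set.update M (PySem.Set.ofList l) = PySem.Set.update M l := by
  rw [PySem.Set.update_eq_append_filter, PySem.Set.update_eq_append_filter,
    PySem.Set.ofList_ofList]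

lemma pv_foldl_update (w : List String → List (List String)) :
    ∀ (rhss : List (List String)) (M : PySem.Set (List String)),
      rhss.foldl (fun M rhs => PySem.Set.update M (w rhs)) M =
        PySem.Set.update M (rhss.flatMap w) := by
  intro rhss
  induction rhss with
  | nil => intro M; rfl
  | cons r t ih =>
    intro M
    rw [List.foldl_cons, ih, List.flatMap_cons, PySem.Set.update_append]

lemma pv_first_eq (G : PySem.Dict String (List (List String))) (k : Int)
    (F : PySem.Dict String (PySem.Set (List String))) (x : String) :
    firstA G k F x = firstB G k F x := by
  unfold firstA firstB
  have hS : ∀ rhs : List String,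
      rhs.foldl (fun S y => concatA k S (pvOpt F y)) ([[]] : PySem.Set (List String)) =
        PySem.Set.ofList (walkB k F rhs []) := by
    intro rhs
    have h0 : ([[]] : PySem.Set (List String)) =
        PySem.Set.ofList ([[]] : List (List String)) := rfl
    rw [h0, pv_L2 k F rhs [[]] (by intro a ha; simp at ha; subst ha; exact pv_slice_nil k)]
    simp
  calc (G.getD x []).foldl (fun M rhs =>
        PySem.Set.update M
          (rhs.foldl (fun S y => concatA k S (if isTerminal y then [[y]] else F.getD y []))
            ([[]] : PySem.Set (List String)))) []
      = (G.getD x []).foldl (fun M rhs =>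
          PySem.Set.update M (walkB k F rhs [])) [] := by
        apply PySem.List.foldl_congr_mem
        intro M rhs _
        rw [show (fun S y => concatA k S (if isTerminal y then [[y]] else F.getD y [])) =
            (fun S y => concatA k S (pvOpt F y)) from rfl, hS rhs, pv_update_ofList]
    _ = PySem.Set.update [] ((G.getD x []).flatMap (fun rhs => walkB k F rhs [])) := by
        rw [pv_foldl_update (fun rhs => walkB k F rhs []) (G.getD x []) []]
    _ = PySem.Set.ofList ((G.getD x []).flatMap (fun rhs => walkB k F rhs [])) := by
        rw [PySem.Set.update_nil_left]

lemma pv_dict_overwrite (v : String → PySem.Set (List String)) :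
    ∀ (l₂ done : List (String × PySem.Set (List String))),
      ((done ++ l₂).map Prod.fst).Nodup →
      (l₂.map Prod.fst).foldl (fun d nt => d.insert nt (v nt))
          (PySem.Dict.mk (done ++ l₂)) =
        PySem.Dict.mk (done ++ l₂.map (fun p => (p.1, v p.1))) := by
  intro l₂
  induction l₂ with
  | nil => intro done _; simp
  | cons p rest ih =>
    intro done hnd
    have hdone : ∀ q ∈ done, q.1 ≠ p.1 := by
      intro q hq hqe
      rw [List.map_append, List.nodup_append] at hnd
      exact hnd.2.2 q.1 (List.mem_map_of_mem hq) p.1 (by simp) hqe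
    have hrest : ∀ q ∈ rest, q.1 ≠ p.1 := by
      intro q hq hqe
      rw [List.map_append] at hnd
      have h1 := hnd.of_append_right
      rw [List.map_cons, List.nodup_cons] at h1
      exact h1.1 (by rw [← hqe]; exact List.mem_map_of_mem hq)
    have hcont : (PySem.Dict.mk (done ++ p :: rest)).contains p.1 = true := by
      rw [PySem.Dict.contains_iff_mem_keys, PySem.Dict.keys_mk]
      simp
    have hins : (PySem.Dict.mk (done ++ p :: rest)).insert p.1 (v p.1) =
        PySem.Dict.mk ((done ++ [(p.1, v p.1)]) ++ rest) := by
      apply PySem.Dict.ext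
      rw [PySem.Dict.items_insert_of_contains _ _ hcont]
      show (done ++ p :: rest).map
          (fun q => if (q.1 == p.1) = true then (p.1, v p.1) else q) = _
      rw [List.map_append, List.map_cons]
      have h1 : done.map (fun q => if (q.1 == p.1) = true then (p.1, v p.1) else q)
          = done := by
        conv_rhs => rw [← List.map_id done]
        apply List.map_congr_left
        intro q hq
        simp [hdone q hq]
      have h2 : rest.map (fun q => if (q.1 == p.1) = true then (p.1, v p.1) else q)
          = rest := by
        conv_rhs => rw [← List.map_id rest]
        apply List.map_congr_left
        intro q hq
        simp [hrest q hq]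
      rw [h1, h2, if_pos (by simp)]
      simp
    rw [List.map_cons, List.foldl_cons, hins]
    have hnd' : (((done ++ [(p.1, v p.1)]) ++ rest).map Prod.fst).Nodup := by
      simpa using hnd
    rw [ih (done ++ [(p.1, v p.1)]) hnd']
    simp

lemma pv_dict_overwrite0 (v : String → PySem.Set (List String))
    (l : List (String × PySem.Set (List String))) (h : (l.map Prod.fst).Nodup) :
    (l.map Prod.fst).foldl (fun d nt => d.insert nt (v nt)) (PySem.Dict.mk l) =
      PySem.Dict.mk (l.map (fun p => (p.1, v p.1))) := by
  have := pv_dict_overwrite v l [] (by simpa using h)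
  simpa using this

-- Dict.ofList builds Dict.mk when the keys are distinct
lemma pv_ofList_eq_mk (l : List (String × PySem.Set (List String)))
    (h : (l.map Prod.fst).Nodup) : PySem.Dict.ofList l = PySem.Dict.mk l := by
  apply PySem.Dict.ext
  show (l.foldl (fun d p => d.insert p.1 p.2) PySem.Dict.empty).items = l
  rw [PySem.Dict.items_foldl_insert_fresh l Prod.fst Prod.snd PySem.Dict.empty
    (fun a _ => PySem.Dict.contains_empty a.1) h]
  simp [PySem.Dict.empty]

lemma pv_map_fst_zip (names : List String) (table : List (PySem.Set (List String)))
    (h : table.length = names.length) :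
    (names.zip table).map Prod.fst = names :=
  List.map_fst_zip (le_of_eq h.symm)

lemma pv_zip_map (v : String → PySem.Set (List String)) :
    ∀ (names : List String) (table : List (PySem.Set (List String))),
      table.length = names.length →
      (names.zip table).map (fun p => (p.1, v p.1)) = names.zip (names.map v) := by
  intro names
  induction names with
  | nil => intro table _; rfl
  | cons n ns ih =>
    intro table h
    cases table with
    | nil => simp at h
    | cons t ts =>
      simp only [List.zip_cons_cons, List.map_cons]
      rw [ih ts (by simpa using h)]

-- one step of A on a table dict is one step of B on the table
lemma pv_stepA_table (Gd : PySem.Dict String (List (List String))) (k : Int)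
    (names : List String) (table : List (PySem.Set (List String)))
    (hnd : names.Nodup) (hlen : table.length = names.length) :
    stepA Gd k (PySem.Dict.mk (names.zip table)) =
      PySem.Dict.mk (names.zip
        (names.map (fun x => firstB Gd k (PySem.Dict.mk (names.zip table)) x))) := by
  have hznd : ((names.zip table).map Prod.fst).Nodup := by
    rw [pv_map_fst_zip names table hlen]; exact hnd
  unfold stepA
  rw [show (PySem.Dict.mk (names.zip table)).keys = (names.zip table).map Prod.fst from rfl,
    pv_dict_overwrite0 (firstA Gd k (PySem.Dict.mk (names.zip table))) _ hznd,
    pv_zip_map _ names table hlen]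
  have hmap : names.map (fun x => firstA Gd k (PySem.Dict.mk (names.zip table)) x) =
      names.map (fun x => firstB Gd k (PySem.Dict.mk (names.zip table)) x) :=
    List.map_congr_left (fun x _ => pv_first_eq Gd k (PySem.Dict.mk (names.zip table)) x)
  rw [hmap]

-- lookup in a zip dict with distinct names, elementwise
lemma pv_getD_zip_head (n : String) (t : PySem.Set (List String))
    (rest : List (String × PySem.Set (List String))) :
    (PySem.Dict.mk ((n, t) :: rest)).getD n [] = t := by
  rw [PySem.Dict.getD_eq_get?_getD, PySem.Dict.get?_mk_cons]
  simp

lemma pv_getD_zip_tail (n x : String) (hx : x ≠ n) (t : PySem.Set (List String))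
    (rest : List (String × PySem.Set (List String))) :
    (PySem.Dict.mk ((n, t) :: rest)).getD x [] = (PySem.Dict.mk rest).getD x [] := by
  rw [PySem.Dict.getD_eq_get?_getD, PySem.Dict.get?_mk_cons,
    if_neg (by simp [Ne.symm hx]), ← PySem.Dict.getD_eq_get?_getD]

-- A's value comparison on two table dicts is B's pairwise list comparison
lemma pv_all_congr (l : List String) (p q : String → Bool) (h : ∀ x ∈ l, p x = q x) :
    l.all p = l.all q := by
  induction l with
  | nil => rfl
  | cons a t ih =>
    simp only [List.all_cons, h a (by simp), ih (fun x hx => h x (by simp [hx]))]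

lemma pv_equal_self {α : Type} [BEq α] [LawfulBEq α] (s : PySem.Set α) :
    PySem.Set.equal s s = true :=
  (PySem.Set.equal_iff _ _).mpr (fun _ => Iff.rfl)

lemma pv_all_getD :
    ∀ (names : List String) (table new : List (PySem.Set (List String))),
      names.Nodup → table.length = names.length → new.length = names.length →
      (names.all (fun nt =>
        PySem.Set.equal ((PySem.Dict.mk (names.zip table)).getD nt [])
          ((PySem.Dict.mk (names.zip new)).getD nt []))) = setListEq table new := by
  intro names
  induction names with
  | nil =>
    intro table new _ ht hn
    rw [List.length_eq_zero_iff.mp ht, List.length_eq_zero_iff.mp hn]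
    rfl
  | cons n ns ih =>
    intro table new hnd ht hn
    cases table with
    | nil => simp at ht
    | cons t ts =>
      cases new with
      | nil => simp at hn
      | cons u us =>
        have hts : ts.length = ns.length := by simpa using ht
        have hus : us.length = ns.length := by simpa using hn
        have hnin : n ∉ ns := (List.nodup_cons.mp hnd).1
        rw [List.zip_cons_cons, List.zip_cons_cons, List.all_cons,
          pv_getD_zip_head, pv_getD_zip_head]
        have htl : ns.all (fun nt =>
            PySem.Set.equal ((PySem.Dict.mk ((n, t) :: ns.zip ts)).getD nt [])
              ((PySem.Dict.mk ((n, u) :: ns.zip us)).getD nt [])) =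
            ns.all (fun nt =>
            PySem.Set.equal ((PySem.Dict.mk (ns.zip ts)).getD nt [])
              ((PySem.Dict.mk (ns.zip us)).getD nt [])) := by
          apply pv_all_congr
          intro x hx
          have hxn : x ≠ n := fun hxe => hnin (hxe ▸ hx)
          rw [pv_getD_zip_tail n x hxn, pv_getD_zip_tail n x hxn]
        rw [htl, ih ts us (List.nodup_cons.mp hnd).2 hts hus]
        rfl

lemma pv_feq_eq_setListEq (names : List String)
    (table new : List (PySem.Set (List String))) (hnd : names.Nodup)
    (ht : table.length = names.length) (hn : new.length = names.length) :
    pyFEq (PySem.Dict.mk (names.zip table)) (PySem.Dict.mk (names.zip new)) =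
      setListEq table new := by
  unfold pyFEq
  rw [show (PySem.Dict.mk (names.zip table)).keys = (names.zip table).map Prod.fst from rfl,
    show (PySem.Dict.mk (names.zip new)).keys = (names.zip new).map Prod.fst from rfl,
    pv_map_fst_zip names table ht, pv_map_fst_zip names new hn, pv_equal_self,
    Bool.true_and, pv_all_getD names table new hnd ht hn]

-- refineB keeps the table parallel to names
lemma pv_refine_length (Gd : PySem.Dict String (List (List String))) (k : Int)
    (names : List String) :
    ∀ (fuel : Nat) (table : List (PySem.Set (List String))),
      table.length = names.length →
      (refineB Gd k names fuel table).length = names.length := by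
  intro fuel
  induction fuel with
  | zero => intro table h; exact h
  | succ n ih =>
    intro table h
    rw [refineB]
    split
    · exact h
    · exact ih _ (List.length_map ..)

-- B's fixpoint recursion tracks A's loop on the corresponding dict
lemma pv_loop_refine (Gd : PySem.Dict String (List (List String))) (k : Int)
    (names : List String) (hnd : names.Nodup) :
    ∀ (fuel : Nat) (table : List (PySem.Set (List String))),
      table.length = names.length →
      loopA Gd k fuel (PySem.Dict.mk (names.zip table)) =
        PySem.Dict.mk (names.zip (refineB Gd k names fuel table)) := by
  intro fuel
  induction fuel with
  | zero => intro table _; rfl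
  | succ n ih =>
    intro table hlen
    have hof : PySem.Dict.ofList (names.zip table) = PySem.Dict.mk (names.zip table) :=
      pv_ofList_eq_mk _ (by rw [pv_map_fst_zip names table hlen]; exact hnd)
    have hnew : (names.map (fun x =>
        firstB Gd k (PySem.Dict.mk (names.zip table)) x)).length = names.length :=
      List.length_map ..
    rw [loopA, refineB, hof,
      pv_stepA_table Gd k names table hnd hlen,
      pv_feq_eq_setListEq names table _ hnd hlen hnew]
    by_cases hc : setListEq table
        (names.map (fun x => firstB Gd k (PySem.Dict.mk (names.zip table)) x)) = true
    · rw [if_pos hc, if_pos hc]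
    · rw [if_neg hc, if_neg hc]
      exact ih _ hnew

lemma pv_zip_map_self (names : List String) (v : String → PySem.Set (List String)) :
    names.map (fun n => (n, v n)) = names.zip (names.map v) := by
  have := @List.zip_map' String String (PySem.Set (List String)) id v names
  simpa using this.symm

lemma pv_top (G : List (String × List (List String))) (k : Int) :
    firstk G k = firstk_alt G k := by
  unfold firstk firstk_alt
  simp only []
  have hnd : (PySem.Dict.ofList G).keys.Nodup := PySem.Dict.nodup_keys_ofList G
  have hinit : ((PySem.Dict.ofList G).keys.foldl
      (fun d nt => d.insert nt ([] : PySem.Set (List String))) PySem.Dict.empty) =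
      PySem.Dict.mk ((PySem.Dict.ofList G).keys.zip
        ((PySem.Dict.ofList G).keys.map (fun _ => []))) := by
    apply PySem.Dict.ext
    rw [PySem.Dict.items_foldl_insert_fresh (PySem.Dict.ofList G).keys (fun a => a)
      (fun _ => ([] : PySem.Set (List String))) PySem.Dict.empty
      (fun a _ => PySem.Dict.contains_empty a) (by simpa using hnd)]
    rw [pv_zip_map_self]
    rfl
  rw [hinit, pv_loop_refine (PySem.Dict.ofList G) k (PySem.Dict.ofList G).keys hnd
    1000000 _ (List.length_map ..)]
  rw [pv_ofList_eq_mk ((PySem.Dict.ofList G).keys.zip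
      (refineB (PySem.Dict.ofList G) k (PySem.Dict.ofList G).keys 1000000
        ((PySem.Dict.ofList G).keys.map (fun _ => [])))) (by
    rw [pv_map_fst_zip _ _ (pv_refine_length (PySem.Dict.ofList G) k
      (PySem.Dict.ofList G).keys 1000000 _ (List.length_map ..))]
    exact hnd)]

-- ===== VERDICT (by name: the statement is the Claim_ definition above) =====
theorem firstk_spec : Claim_equal_firstk := by
  intro G k _ _
  unfold Spec_firstk
  exact pv_top G k
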